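-- pv_equiv track=rewrite | github.com/Wurre/overthewire | krypton/krypton5/krypton5_solver.py | split_cipher
-- ===== SOURCE A (Python) =====
-- def split_cipher(cipher, key_length):
--     pos = 0
--     krypt_list = ['']*key_length
--     for letter in cipher:
--         if pos > (key_length - 1):
--             pos = 0
--         krypt_list[pos] += letter
--         pos += 1
--     return krypt_list
-- ===== SOURCE B (Python) =====
-- def split_cipher(cipher, key_length):
--     return [cipher[i::key_length] for i in range(key_length)]
-- ===== Notes on version B (the rewrite author's own statement) =====
-- stated objective: idiomatic
-- what changed: Builds each column with one strided slice cipher[i::key_length] instead of a character-by-character pass that wraps a modular position counter and grows the columns by string concatenation.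
import Mathlib
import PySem

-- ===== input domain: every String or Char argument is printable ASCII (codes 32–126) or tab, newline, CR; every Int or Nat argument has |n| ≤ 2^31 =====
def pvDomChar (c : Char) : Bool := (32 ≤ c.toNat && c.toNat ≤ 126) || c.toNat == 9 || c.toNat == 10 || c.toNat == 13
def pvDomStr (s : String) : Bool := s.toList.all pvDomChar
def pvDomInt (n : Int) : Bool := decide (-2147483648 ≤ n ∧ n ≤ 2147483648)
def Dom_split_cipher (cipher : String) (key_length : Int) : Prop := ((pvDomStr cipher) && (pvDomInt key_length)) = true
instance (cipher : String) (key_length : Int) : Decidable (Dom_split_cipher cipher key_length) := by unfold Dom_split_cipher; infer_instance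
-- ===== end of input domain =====

-- B builds each column with one strided slice cipher[i::key_length] instead of A's
-- char-by-char pass with a wrapping position counter (objective: idiomatic).


-- ===== PORT A =====
-- one loop iteration: wrap pos, append the letter to column pos, advance pos
def stepA (key_length : Int) (st : Int × List String) (letter : Char) : Int × List String :=
  let pos := if st.1 > key_length - 1 then 0 else st.1
  (pos + 1, st.2.set pos.toNat ((st.2.getD pos.toNat "").push letter))

def split_cipher (cipher : String) (key_length : Int) : List String :=
  (cipher.toList.foldl (stepA key_length) (0, List.replicate key_length.toNat "")).2

-- ===== PORT B =====
def split_cipher_alt (cipher : String) (key_length : Int) : List String :=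
  (PySem.List.pyRange 0 key_length 1).map
    (fun i => (PySem.Str.slice? cipher (some i) none key_length).getD "")

-- ===== PRECONDITION & SPEC =====
-- Pre_ excludes exactly the inputs where A raises IndexError: key_length <= 0 with
-- a non-empty cipher (the list [''] * key_length is empty but gets indexed at 0).
def Pre_split_cipher (cipher : String) (key_length : Int) : Prop :=
  1 ≤ key_length ∨ cipher = ""
instance (cipher : String) (key_length : Int) : Decidable (Pre_split_cipher cipher key_length) := by unfold Pre_split_cipher; infer_instance

def pvWitness_split_cipher : String × Int := ("HELLOWORLD", 3)

def Spec_split_cipher (cipher : String) (key_length : Int) (out : List String) : Prop := out = split_cipher_alt cipher key_length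
instance (cipher : String) (key_length : Int) (out : List String) : Decidable (Spec_split_cipher cipher key_length out) := by unfold Spec_split_cipher; infer_instance

-- ===== CLAIM (what is proved, stated in full; the proofs are below) =====
def Claim_equal_split_cipher : Prop := ∀ (cipher : String) (key_length : Int), Dom_split_cipher cipher key_length → Pre_split_cipher cipher key_length → Spec_split_cipher cipher key_length (split_cipher cipher key_length)
-- ===== LEMMAS AND PROOFS =====

-- every n-th element of a list, starting with the head
def everyNth (n : Nat) : List Char → List Char
  | [] => []
  | c :: rest => c :: everyNth n (rest.drop (n - 1))
termination_by l => l.length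
decreasing_by simp

lemma everyNth_nil (n : Nat) : everyNth n [] = [] := by rw [everyNth]
lemma everyNth_cons (n : Nat) (c : Char) (rest : List Char) :
    everyNth n (c :: rest) = c :: everyNth n (rest.drop (n - 1)) := by rw [everyNth]

lemma filterMap_range_everyNth (n : Nat) (hn : 1 ≤ n) :
    ∀ (m : Nat) (xs : List Char), xs.length ≤ n * m →
      List.filterMap (fun j => xs[n*j]?) (List.range m) = everyNth n xs := by
  intro m
  induction m with
  | zero =>
    intro xs h
    have : xs = [] := by
      cases xs <;> simp_all
    subst this
    simp [everyNth_nil]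
  | succ m ih =>
    intro xs h
    cases xs with
    | nil => simp [everyNth_nil]
    | cons c rest =>
      obtain ⟨n', rfl⟩ : ∃ n', n = n' + 1 := ⟨n - 1, by omega⟩
      rw [List.range_succ_eq_map, List.filterMap_cons, List.filterMap_map]
      simp only [Nat.mul_zero, List.getElem?_cons_zero]
      have hfm : List.filterMap ((fun j => (c :: rest)[(n' + 1) * j]?) ∘ Nat.succ) (List.range m)
          = List.filterMap (fun j => ((c :: rest).drop (n' + 1))[(n' + 1) * j]?) (List.range m) := by
        apply List.filterMap_congr
        intro j _
        simp only [Function.comp]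
        rw [List.getElem?_drop]
        congr 1
        rw [Nat.mul_succ]
        omega
      have hlen : ((c :: rest).drop (n' + 1)).length ≤ (n' + 1) * m := by
        rw [Nat.mul_succ] at h
        simp only [List.length_drop, List.length_cons] at *
        omega
      rw [hfm, ih _ hlen, List.drop_succ_cons, everyNth_cons]
      simp

lemma le_mul_ceil (d k : Nat) (hk : 0 < k) : d ≤ k * ((d + k - 1) / k) := by
  have h1 := Nat.div_add_mod (d + k - 1) k
  have h2 : (d + k - 1) % k < k := Nat.mod_lt _ hk
  set q := (d + k - 1) / k with hq
  set r := (d + k - 1) % k with hr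
  rcases Nat.eq_zero_or_pos d with h0 | h0
  · simp [h0]
  · have h3 : k * q = d + k - 1 - r := by omega
    have h4 : r ≤ k - 1 := by omega
    calc d ≤ d + k - 1 - (k - 1) := by omega
      _ ≤ d + k - 1 - r := by omega
      _ = k * q := h3.symm

lemma slice?_everyNth (xs : List Char) (i k : Int) (hi : 0 ≤ i) (hk : 1 ≤ k) :
    PySem.List.slice? xs (some i) none k = some (everyNth k.toNat (xs.drop i.toNat)) := by
  simp only [PySem.List.slice?, PySem.List.sliceIndices]
  have h1 : ¬ (k = 0) := by omega
  have h2 : ¬ (k < 0) := by omega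
  have h3 : 0 < k := by omega
  have h4 : ¬ (i < 0) := by omega
  simp only [if_neg h1, if_neg h2, if_pos h3, if_neg h4]
  have hs0 : (0:Int) ≤ min i ↑xs.length := by
    simp only [le_min_iff]
    exact ⟨hi, by positivity⟩
  have hsN : (min i (xs.length:Int)).toNat = min i.toNat xs.length := by omega
  have hidx : ∀ x : Nat, (xs[(min i ↑xs.length + k * (x:Int)).toNat]?)
      = ((xs.drop (min i.toNat xs.length))[k.toNat * x]?) := by
    intro x
    rw [List.getElem?_drop]
    congr 1
    have : (min i ↑xs.length + k * (x:Int)).toNat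
        = (min i ↑xs.length).toNat + k.toNat * x := by
      have hx : (0:Int) ≤ (x:Int) := by positivity
      have hkx : ((k.toNat * x : Nat) : Int) = k * (x:Int) := by
        push_cast
        rw [Int.toNat_of_nonneg (by omega : (0:Int) ≤ k)]
      have := Int.toNat_of_nonneg hs0
      omega
    omega
  have hdropEq : xs.drop (min i.toNat xs.length) = xs.drop i.toNat := by
    by_cases h : i.toNat ≤ xs.length
    · rw [min_eq_left h]
    · rw [min_eq_right (by omega), List.drop_length, List.drop_eq_nil_of_le (by omega)]
  by_cases hlt : min i ↑xs.length < ↑xs.length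
  · rw [if_pos hlt]
    simp only [hidx]
    rw [filterMap_range_everyNth k.toNat (by omega) _ _ ?_, hdropEq]
    -- length bound: (xs.drop sN).length ≤ k.toNat * count
    have hd : (xs.drop (min i.toNat xs.length)).length = xs.length - min i.toNat xs.length := by
      simp
    rw [hd]
    have hrw : (↑xs.length - min i ↑xs.length + k - 1)
        = ((xs.length - min i.toNat xs.length + k.toNat - 1 : Nat) : Int) := by omega
    rw [hrw, show k = ((k.toNat : Nat) : Int) by omega, ← Int.natCast_div, Int.toNat_natCast]
    exact le_mul_ceil _ _ (by omega)
  · rw [if_neg hlt]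
    have hge : xs.length ≤ min i.toNat xs.length := by omega
    have : xs.drop i.toNat = [] := by
      rw [← hdropEq]
      exact List.drop_eq_nil_of_le hge
    simp [this, everyNth_nil]

lemma push_append_ofList (s : String) (c : Char) (l : List Char) :
    (s.push c) ++ String.ofList l = s ++ String.ofList (c :: l) := by
  apply String.toList_inj.mp
  simp

lemma foldA_inv (k : Int) (hk : 1 ≤ k) (xs : List Char) :
    ∀ (p : Int) (L : List String), 0 ≤ p → p ≤ k → L.length = k.toNat →
      (xs.foldl (stepA k) (p, L)).2.length = k.toNat ∧
      ∀ j, j < k.toNat →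
        ((xs.foldl (stepA k) (p, L)).2).getD j "" =
          L.getD j "" ++ String.ofList (everyNth k.toNat
            (xs.drop (if (if p > k - 1 then 0 else p).toNat ≤ j
                      then j - (if p > k - 1 then 0 else p).toNat
                      else j + k.toNat - (if p > k - 1 then 0 else p).toNat))) := by
  induction xs with
  | nil =>
    intro p L hp0 hpk hL
    simp only [List.foldl_nil]
    refine ⟨hL, ?_⟩
    intro j hj
    simp [everyNth_nil]
  | cons c t ih =>
    intro p L hp0 hpk hL
    simp only [List.foldl_cons]
    have hstep : stepA k (p, L) c
        = ((if p > k - 1 then 0 else p) + 1,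
           L.set (if p > k - 1 then 0 else p).toNat
             ((L.getD (if p > k - 1 then 0 else p).toNat "").push c)) := by
      simp [stepA]
    rw [hstep]
    set p' : Int := if p > k - 1 then 0 else p with hp'
    have hp'0 : 0 ≤ p' := by rw [hp']; split <;> omega
    have hp'k : p' ≤ k - 1 := by rw [hp']; split <;> omega
    obtain ⟨ihlen, ihget⟩ := ih (p' + 1)
      (L.set p'.toNat ((L.getD p'.toNat "").push c))
      (by omega) (by omega) (by simpa using hL)
    refine ⟨ihlen, ?_⟩
    intro j hj
    rw [ihget j hj]
    have hpN : p'.toNat < k.toNat := by omega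
    have hw : (if p' + 1 > k - 1 then 0 else p' + 1).toNat
        = if p'.toNat = k.toNat - 1 then 0 else p'.toNat + 1 := by
      split
      · split <;> omega
      · split <;> omega
    rw [hw]
    by_cases hjp : j = p'.toNat
    · subst hjp
      have hset : (L.set p'.toNat ((L.getD p'.toNat "").push c)).getD p'.toNat ""
          = (L.getD p'.toNat "").push c := by
        rw [List.getD_eq_getElem?_getD, List.getElem?_set_self (by omega)]
        rfl
      rw [hset]
      have hoffL : (if (if p'.toNat = k.toNat - 1 then 0 else p'.toNat + 1) ≤ p'.toNat
          then p'.toNat - (if p'.toNat = k.toNat - 1 then 0 else p'.toNat + 1)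
          else p'.toNat + k.toNat - (if p'.toNat = k.toNat - 1 then 0 else p'.toNat + 1))
          = k.toNat - 1 := by
        split_ifs <;> omega
      have hoffR : (if p'.toNat ≤ p'.toNat then p'.toNat - p'.toNat
          else p'.toNat + k.toNat - p'.toNat) = 0 := by simp
      rw [hoffL, hoffR, List.drop_zero, everyNth_cons]
      rw [push_append_ofList]
    · have hset : (L.set p'.toNat ((L.getD p'.toNat "").push c)).getD j ""
          = L.getD j "" := by
        rw [List.getD_eq_getElem?_getD, List.getElem?_set_ne (by omega),
          ← List.getD_eq_getElem?_getD]
      rw [hset]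
      set wN := if p'.toNat = k.toNat - 1 then 0 else p'.toNat + 1 with hwN
      have hwNlt : wN < k.toNat := by rw [hwN]; split <;> omega
      have hoffR : (if p'.toNat ≤ j then j - p'.toNat else j + k.toNat - p'.toNat)
          = ((if wN ≤ j then j - wN else j + k.toNat - wN)) + 1 := by
        rw [hwN]
        split_ifs <;> omega
      rw [hoffR, List.drop_succ_cons]


-- ===== VERDICT (by name: the statement is the Claim_ definition above) =====
theorem split_cipher_spec : Claim_equal_split_cipher := by
  intro cipher k _ hpre
  show split_cipher cipher k = split_cipher_alt cipher k
  by_cases hk : 1 ≤ k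
  · unfold split_cipher split_cipher_alt
    obtain ⟨hlen, hget⟩ := foldA_inv k hk cipher.toList 0 (List.replicate k.toNat "")
      le_rfl (by omega) (by simp)
    have hB : ∀ i : Int, 0 ≤ i →
        (PySem.Str.slice? cipher (some i) none k).getD ""
          = String.ofList (everyNth k.toNat (cipher.toList.drop i.toNat)) := by
      intro i hi
      unfold PySem.Str.slice? PySem.Chars.slice?
      rw [slice?_everyNth _ _ _ hi hk]
      rfl
    rw [PySem.List.pyRange_one, List.map_map]
    apply List.ext_getElem
    · rw [hlen]
      simp
    · intro j h1 h2
      have hj : j < k.toNat := by rw [hlen] at h1; exact h1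
      have hA : (cipher.toList.foldl (stepA k) (0, List.replicate k.toNat "")).2[j]
          = ((cipher.toList.foldl (stepA k) (0, List.replicate k.toNat "")).2).getD j "" := by
        rw [List.getD_eq_getElem _ _ h1]
      rw [hA, hget j hj]
      simp only [List.getElem_map, List.getElem_range, Function.comp]
      rw [hB _ (by positivity)]
      have h0 : ((if (0:Int) > k - 1 then 0 else 0 : Int)).toNat = 0 := by
        split <;> omega
      rw [h0]
      have hoff : (if 0 ≤ j then j - 0 else j + k.toNat - 0) = j := by simp
      rw [hoff]
      have hrep : (List.replicate k.toNat "").getD j "" = "" := by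
        rw [List.getD_eq_getElem _ _ (by simpa using hj)]
        simp
      rw [hrep]
      have hi : ((0 : Int) + (j : Int)).toNat = j := by omega
      rw [hi]
      simp
  · have hc : cipher = "" := hpre.resolve_left hk
    subst hc
    have hkn : k.toNat = 0 := by omega
    have hrange : PySem.List.pyRange 0 k 1 = [] := PySem.List.pyRange_one_eq_nil (by omega)
    simp [split_cipher, split_cipher_alt, hrange, hkn]
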